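-- pv_equiv track=rewrite | github.com/JeromeMoreau/TickRecorder | server.py | format_symbols
-- ===== SOURCE A (Python) =====
-- def format_symbols(traded, available):
--     symbols_dict = {}
--     for symbol in available:
--         if symbol in traded:
--             symbols_dict[symbol]=True
--         else:
--             symbols_dict[symbol]=False
--     return symbols_dict
-- ===== SOURCE B (Python) =====
-- def format_symbols(traded, available):
--     result = dict.fromkeys(available, False)
--     for symbol in traded:
--         if symbol in result:
--             result[symbol] = True
--     return result
-- ===== Notes on version B (the rewrite author's own statement) =====
-- stated objective: idiomatic
-- what changed: Instead of one pass over available with a linear 'symbol in traded' scan per element, B builds the dict with dict.fromkeys(available, False) and then marks keys True in a pass over traded testing membership in the dict, removing the inner list scan.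
import Mathlib
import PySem

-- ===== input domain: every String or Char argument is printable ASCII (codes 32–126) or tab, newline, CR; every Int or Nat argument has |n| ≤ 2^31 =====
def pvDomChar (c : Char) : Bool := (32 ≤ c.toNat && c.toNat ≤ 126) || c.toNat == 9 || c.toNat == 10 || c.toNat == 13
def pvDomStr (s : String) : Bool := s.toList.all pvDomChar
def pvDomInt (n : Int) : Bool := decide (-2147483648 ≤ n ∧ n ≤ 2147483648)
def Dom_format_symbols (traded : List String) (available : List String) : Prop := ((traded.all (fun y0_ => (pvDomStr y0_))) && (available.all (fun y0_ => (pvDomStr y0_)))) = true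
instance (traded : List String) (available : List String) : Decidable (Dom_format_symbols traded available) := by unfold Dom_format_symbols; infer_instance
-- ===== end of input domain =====

-- B replaces A's per-available-symbol linear scan of `traded` with dict.fromkeys(available, False)
-- followed by a marking pass over `traded` (membership tested against the dict), a different decomposition.


-- ===== PORT A =====
def format_symbols (traded : List String) (available : List String) : List (String × Bool) :=
  (available.foldl
    (fun symbols_dict symbol =>
      if traded.contains symbol then symbols_dict.insert symbol true
      else symbols_dict.insert symbol false)
    (PySem.Dict.empty : PySem.Dict String Bool)).items

-- ===== PORT B =====
def format_symbols_alt (traded : List String) (available : List String) : List (String × Bool) :=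
  -- dict.fromkeys(available, False)
  let result : PySem.Dict String Bool :=
    available.foldl (fun d symbol => d.insert symbol false) PySem.Dict.empty
  (traded.foldl
    (fun result symbol =>
      if result.contains symbol then result.insert symbol true else result)
    result).items

-- ===== PRECONDITION & SPEC =====
def Spec_format_symbols (traded : List String) (available : List String) (out : List (String × Bool)) : Prop := out = format_symbols_alt traded available
instance (traded : List String) (available : List String) (out : List (String × Bool)) : Decidable (Spec_format_symbols traded available out) := by unfold Spec_format_symbols; infer_instance

-- ===== CLAIM (what is proved, stated in full; the proofs are below) =====
def Claim_equal_format_symbols : Prop := ∀ (traded : List String) (available : List String), Dom_format_symbols traded available → Spec_format_symbols traded available (format_symbols traded available)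

-- ===== LEMMAS AND PROOFS =====

/-- Pointwise effect of the marking pass: key in `ts` ↦ true, else untouched. -/
def pvMark (ts : List String) (p : String × Bool) : String × Bool :=
  if ts.contains p.1 then (p.1, true) else p

theorem pvMark_fst (ts : List String) (p : String × Bool) : (pvMark ts p).1 = p.1 := by
  unfold pvMark; split <;> rfl

/-- B's marking loop, with Nodup keys, maps `pvMark ts` over the items. -/
theorem markAll_items (ts : List String) (d : PySem.Dict String Bool)
    (hnd : d.keys.Nodup) :
    (ts.foldl (fun d s => if d.contains s then d.insert s true else d) d).items
      = d.items.map (pvMark ts) := by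
  induction ts generalizing d with
  | nil =>
    simp only [List.foldl_nil]
    rw [List.map_congr_left (fun p _ => (by simp [pvMark] : pvMark [] p = p))]
    simp
  | cons t ts ih =>
    simp only [List.foldl_cons]
    by_cases hc : d.contains t = true
    · have hnd' : (d.insert t true).keys.Nodup := by
        rw [PySem.Dict.keys_insert_of_contains d true hc]; exact hnd
      rw [if_pos hc, ih _ hnd', PySem.Dict.items_insert_of_contains d true hc,
        List.map_map]
      apply List.map_congr_left
      intro p _
      simp only [Function.comp_apply, pvMark]
      by_cases h1 : p.1 = t
      · subst h1
        simp
      · have h1' : (p.1 == t) = false := by simp [h1]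
        simp [h1', h1]
    · have hc' : d.contains t = false := by simpa using hc
      rw [if_neg (by simp [hc']), ih _ hnd]
      apply List.map_congr_left
      intro p hp
      have hpk : p.1 ∈ d.keys := PySem.Dict.mem_keys_of_mem_items d hp
      have hne : p.1 ≠ t := by
        intro h; subst h
        simp [(PySem.Dict.contains_iff_mem_keys d p.1).mpr hpk] at hc'
      simp [pvMark, hne]

/-- A's combined fold, related to B's fromkeys fold through `pvMark traded`. -/
theorem insC_fold_items (traded avail : List String)
    (d d' : PySem.Dict String Bool)
    (h : d.items = d'.items.map (pvMark traded)) :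
    (avail.foldl (fun d s => d.insert s (traded.contains s)) d).items
      = (avail.foldl (fun d s => d.insert s false) d').items.map (pvMark traded) := by
  induction avail generalizing d d' with
  | nil => simpa using h
  | cons a as ih =>
    simp only [List.foldl_cons]
    apply ih
    have hkeys : d.keys = d'.keys := by
      unfold PySem.Dict.keys
      rw [h, List.map_map]
      apply List.map_congr_left
      intro p _; exact pvMark_fst traded p
    have hcont : d.contains a = d'.contains a := by
      by_cases hm : a ∈ d'.keys
      · rw [(PySem.Dict.contains_iff_mem_keys d a).mpr (hkeys ▸ hm),
          (PySem.Dict.contains_iff_mem_keys d' a).mpr hm]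
      · have h1 : d.contains a = false := by
          by_contra hx
          exact hm (hkeys ▸ (PySem.Dict.contains_iff_mem_keys d a).mp (by simpa using hx))
        have h2 : d'.contains a = false := by
          by_contra hx
          exact hm ((PySem.Dict.contains_iff_mem_keys d' a).mp (by simpa using hx))
        rw [h1, h2]
    by_cases hc : d'.contains a = true
    · rw [PySem.Dict.items_insert_of_contains d _ (hcont ▸ hc),
        PySem.Dict.items_insert_of_contains d' false hc, h, List.map_map, List.map_map]
      apply List.map_congr_left
      intro p _
      simp only [Function.comp_apply]
      by_cases h1 : p.1 = a
      · have h1' : (pvMark traded p).1 = a := by rw [pvMark_fst]; exact h1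
        simp only [pvMark, h1]
        by_cases ha : a ∈ traded <;> simp [ha, h1]
      · have h1' : ((pvMark traded p).1 == a) = false := by simp [pvMark_fst, h1]
        have h1'' : (p.1 == a) = false := by simp [h1]
        simp [h1', h1'']
    · have hc' : d'.contains a = false := by simpa using hc
      rw [PySem.Dict.items_insert_of_not_contains d _ (by rw [hcont]; exact hc'),
        PySem.Dict.items_insert_of_not_contains d' false hc', h, List.map_append]
      simp only [pvMark, List.map_cons, List.map_nil]
      by_cases ha : a ∈ traded <;> simp [ha]

theorem step_eq (traded : List String) :
    (fun (d : PySem.Dict String Bool) (s : String) =>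
        if traded.contains s then d.insert s true else d.insert s false)
      = fun d s => d.insert s (traded.contains s) := by
  funext d s
  by_cases h : s ∈ traded <;> simp [h]

-- ===== VERDICT (by name: the statement is the Claim_ definition above) =====
theorem format_symbols_spec : Claim_equal_format_symbols := by
  intro traded available _
  unfold Spec_format_symbols format_symbols format_symbols_alt
  rw [step_eq traded]
  have hnd : (available.foldl (fun d s => d.insert s false)
      (PySem.Dict.empty : PySem.Dict String Bool)).keys.Nodup := by
    exact PySem.Dict.nodup_keys_foldl_insert available (fun _ _ => false) _
      PySem.Dict.nodup_keys_empty
  rw [markAll_items traded _ hnd]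
  exact insC_fold_items traded available _ _ rfl
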